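-- pv_equiv track=rewrite | github.com/tu2gin/algorithms-templates | python/1_work.py | zero_location
-- ===== SOURCE A (Python) =====
-- def zero_location(distance):
--     distance_list =distance
--     result_list = [0]*len(distance_list)
--     n = 1
--     zero_index = 1
--     for i in range(0,len(distance_list)):
--         dist_ind = distance_list[i]
--         if int(dist_ind) == 0:
--             zero_index = i
--     for i in range(zero_index+1,len(distance_list)):
--         result_list[i] = n
--         n = n + 1
--     n=1
--     for i in range(zero_index-1,-1,-1):
--         result_list[i] = n
--         n = n + 1
--     return result_list
-- ===== SOURCE B (Python) =====
-- def zero_location(distance):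
--     zero_index = 1
--     for i, v in enumerate(distance):
--         if int(v) == 0:
--             zero_index = i
--     return [abs(i - zero_index) for i in range(len(distance))]
-- ===== Notes on version B (the rewrite author's own statement) =====
-- stated objective: simpler
-- what changed: Replaces the two directional fill loops over a mutated result list with a single pass finding the last zero index followed by a closed-form abs(i - zero_index) comprehension.
import Mathlib
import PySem

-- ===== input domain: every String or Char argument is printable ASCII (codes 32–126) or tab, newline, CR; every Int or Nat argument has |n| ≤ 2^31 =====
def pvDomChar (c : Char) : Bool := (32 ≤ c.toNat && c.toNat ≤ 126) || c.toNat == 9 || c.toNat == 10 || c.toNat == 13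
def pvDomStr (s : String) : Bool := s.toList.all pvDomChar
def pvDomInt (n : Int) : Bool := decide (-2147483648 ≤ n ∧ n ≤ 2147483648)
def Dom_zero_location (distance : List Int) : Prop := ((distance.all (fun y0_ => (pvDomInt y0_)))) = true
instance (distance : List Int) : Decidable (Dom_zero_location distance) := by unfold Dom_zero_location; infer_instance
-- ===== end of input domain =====

-- B replaces A's two directional fill loops with a last-zero scan plus a closed-form |i - zero_index| comprehension (simpler; same O(n) cost).

-- ===== PORT A =====
def zero_location (distance : List Int) : List Int :=
  -- result_list = [0]*len(distance); zero_index = 1 updated by the first loop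
  let result_list : List Int := List.replicate distance.length (0 : Int)
  let zero_index : Int :=
    (PySem.List.pyRange 0 (distance.length : Int) 1).foldl
      (fun zi i => if PySem.List.pyGetD distance i 0 == 0 then i else zi) 1
  -- for i in range(zero_index+1, len): result_list[i] = n; n += 1   (state = (result_list, n))
  let p1 :=
    (PySem.List.pyRange (zero_index + 1) (distance.length : Int) 1).foldl
      (fun (p : List Int × Int) i => (PySem.List.pySetD p.1 i p.2, p.2 + 1)) (result_list, (1 : Int))
  -- for i in range(zero_index-1, -1, -1): result_list[i] = n; n += 1
  let p2 :=
    (PySem.List.pyRange (zero_index - 1) (-1) (-1)).foldl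
      (fun (p : List Int × Int) i => (PySem.List.pySetD p.1 i p.2, p.2 + 1)) (p1.1, (1 : Int))
  p2.1

-- ===== PORT B =====
def zero_location_alt (distance : List Int) : List Int :=
  let zero_index : Int :=
    (PySem.List.enumerate distance).foldl
      (fun zi (p : Int × Int) => if p.2 == 0 then p.1 else zi) 1
  (PySem.List.pyRange 0 (distance.length : Int) 1).map (fun i => |i - zero_index|)

-- ===== PRECONDITION & SPEC =====
-- A raises IndexError on the empty list (the backward loop assigns index 0 of the empty result list)
def Pre_zero_location (distance : List Int) : Prop := distance ≠ []
instance (distance : List Int) : Decidable (Pre_zero_location distance) := by unfold Pre_zero_location; infer_instance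
def pvWitness_zero_location : List Int := [3, 0, 2]

def Spec_zero_location (distance : List Int) (out : List Int) : Prop := out = zero_location_alt distance
instance (distance : List Int) (out : List Int) : Decidable (Spec_zero_location distance out) := by unfold Spec_zero_location; infer_instance

-- ===== CLAIM (what is proved, stated in full; the proofs are below) =====
def Claim_equal_zero_location : Prop := ∀ (distance : List Int), Dom_zero_location distance → Pre_zero_location distance → Spec_zero_location distance (zero_location distance)
-- ===== LEMMAS AND PROOFS =====

-- the fill step shared by A's two writing loops
def pvFill (p : List Int × Int) (i : Int) : List Int × Int :=
  (PySem.List.pySetD p.1 i p.2, p.2 + 1)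

-- the last-zero index is nonnegative (it starts at 1 and is only replaced by range indices ≥ 0)
theorem pv_zi_nonneg (l : List Int) (acc : Int)
    (hacc : 0 ≤ acc) (hl : ∀ i ∈ l, 0 ≤ i) (g : Int → Bool) :
    0 ≤ l.foldl (fun zi i => if g i then i else zi) acc := by
  induction l generalizing acc with
  | nil => exact hacc
  | cons x xs ih =>
      simp only [List.foldl_cons]
      refine ih _ ?_ (fun i hi => hl i (List.mem_cons_of_mem _ hi))
      split
      · exact hl x (List.mem_cons_self)
      · exact hacc

-- right fill: indices a, a+1, … written n, n+1, …
theorem pv_fillR (m : Nat) : ∀ (a : Int) (r : List Int) (n : Int) (k : Nat), 0 ≤ a →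
    (((PySem.List.pyRange a (a + m) 1).foldl pvFill (r, n)).1)[k]? =
      if a ≤ (k : Int) ∧ (k : Int) < a + m ∧ k < r.length then some (n + (k : Int) - a) else r[k]? := by
  induction m with
  | zero =>
      intro a r n k ha
      rw [PySem.List.pyRange_one_eq_nil (by omega)]
      simp only [List.foldl_nil]
      split
      · omega
      · rfl
  | succ m ih =>
      intro a r n k ha
      rw [show a + ((m + 1 : Nat) : Int) = (a + 1) + (m : Int) by push_cast; ring,
          PySem.List.pyRange_one_cons (by omega)]
      simp only [List.foldl_cons, pvFill]
      rw [ih (a + 1) _ (n + 1) k (by omega)]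
      rw [PySem.List.length_pySetD]
      rw [PySem.List.pySetD_of_nonneg r n ha]
      by_cases hcond : a + 1 ≤ (k : Int) ∧ (k : Int) < a + 1 + (m : Int) ∧ k < r.length
      · rw [if_pos hcond, if_pos ⟨by omega, by omega, hcond.2.2⟩]
        congr 1; omega
      · rw [if_neg hcond, List.getElem?_set]
        by_cases hk : a.toNat = k
        · rw [if_pos hk]
          by_cases hklen : k < r.length
          · rw [if_pos (by omega), if_pos ⟨by omega, by omega, hklen⟩]
            congr 1; omega
          · rw [if_neg (by omega), if_neg (by omega)]
            exact (List.getElem?_eq_none (by omega)).symm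
        · rw [if_neg hk]
          by_cases hold : a ≤ (k : Int) ∧ (k : Int) < a + 1 + (m : Int) ∧ k < r.length
          · exfalso; omega
          · rw [if_neg hold]

-- left fill: indices b, b-1, …, 0 written n, n+1, …
theorem pv_fillL (m : Nat) : ∀ (b : Int) (r : List Int) (n : Int) (k : Nat), (b + 1).toNat = m →
    (((PySem.List.pyRange b (-1) (-1)).foldl pvFill (r, n)).1)[k]? =
      if (k : Int) ≤ b ∧ k < r.length then some (n + b - (k : Int)) else r[k]? := by
  induction m with
  | zero =>
      intro b r n k hm
      rw [PySem.List.pyRange_neg_one_eq_nil (by omega)]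
      simp only [List.foldl_nil]
      rw [if_neg (by omega)]
  | succ m ih =>
      intro b r n k hm
      have hb : 0 ≤ b := by omega
      rw [PySem.List.pyRange_neg_one_cons (by omega)]
      simp only [List.foldl_cons, pvFill]
      rw [ih (b - 1) _ (n + 1) k (by omega)]
      rw [PySem.List.length_pySetD]
      rw [PySem.List.pySetD_of_nonneg r n hb]
      by_cases hcond : (k : Int) ≤ b - 1 ∧ k < r.length
      · rw [if_pos hcond, if_pos ⟨by omega, hcond.2⟩]
        congr 1; omega
      · rw [if_neg hcond, List.getElem?_set]
        by_cases hk : b.toNat = k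
        · rw [if_pos hk]
          by_cases hklen : k < r.length
          · rw [if_pos (by omega), if_pos ⟨by omega, hklen⟩]
            congr 1; omega
          · rw [if_neg (by omega), if_neg (by omega)]
            exact (List.getElem?_eq_none (by omega)).symm
        · rw [if_neg hk]
          by_cases hold : (k : Int) ≤ b ∧ k < r.length
          · exfalso; omega
          · rw [if_neg hold]

-- foldl over pvFill preserves the length of the list component
theorem pv_fill_len (l : List Int) : ∀ (r : List Int) (n : Int),
    ((l.foldl pvFill (r, n)).1).length = r.length := by
  induction l with
  | nil => intro r n; rfl
  | cons x xs ih =>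
      intro r n
      simp only [List.foldl_cons, pvFill]
      rw [ih, PySem.List.length_pySetD]

theorem zero_location_spec : Claim_equal_zero_location := by
  intro distance _ _
  unfold Spec_zero_location zero_location zero_location_alt
  rw [PySem.List.enumerate_eq_map_pyRange distance 0, List.foldl_map]
  simp only [PySem.List.len_eq]
  set zi : Int :=
    (PySem.List.pyRange 0 (distance.length : Int) 1).foldl
      (fun zi i => if PySem.List.pyGetD distance i 0 == 0 then i else zi) 1 with hzi
  have hzi0 : 0 ≤ zi := by
    rw [hzi]
    exact pv_zi_nonneg _ 1 (by omega)
      (fun i hi => ((PySem.List.mem_pyRange_one).1 hi).1) _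
  apply List.ext_getElem?
  intro k
  have hA1 := pv_fillR ((distance.length : Int) - (zi + 1)).toNat (zi + 1)
      (List.replicate distance.length (0 : Int)) 1 k (by omega)
  have hfold : (PySem.List.pyRange (zi + 1) ((zi + 1) + (((distance.length : Int) - (zi + 1)).toNat : Int)) 1)
      = PySem.List.pyRange (zi + 1) (distance.length : Int) 1 := by
    by_cases h : zi + 1 ≤ (distance.length : Int)
    · congr 1; omega
    · rw [PySem.List.pyRange_one_eq_nil (by omega), PySem.List.pyRange_one_eq_nil (by omega)]
  rw [hfold] at hA1
  rw [show ((PySem.List.pyRange (zi - 1) (-1) (-1)).foldl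
        (fun (p : List Int × Int) i => (PySem.List.pySetD p.1 i p.2, p.2 + 1)) (_, (1:Int)))
      = (PySem.List.pyRange (zi - 1) (-1) (-1)).foldl pvFill (_, (1:Int)) from rfl]
  rw [show ((PySem.List.pyRange (zi + 1) (distance.length : Int) 1).foldl
        (fun (p : List Int × Int) i => (PySem.List.pySetD p.1 i p.2, p.2 + 1)) (List.replicate distance.length (0:Int), (1:Int)))
      = (PySem.List.pyRange (zi + 1) (distance.length : Int) 1).foldl pvFill (List.replicate distance.length (0:Int), (1:Int)) from rfl]
  rw [pv_fillL ((zi - 1) + 1).toNat (zi - 1) _ 1 k rfl]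
  rw [pv_fill_len, hA1]
  simp only [List.length_replicate, List.getElem?_replicate]
  by_cases hkL : k < distance.length
  · rw [PySem.List.getElem?_map_pyRange_zero _ _ _ hkL]
    by_cases h1 : (k : Int) ≤ zi - 1
    · rw [if_pos ⟨h1, hkL⟩, abs_of_nonpos (by omega)]
      congr 1; omega
    · rw [if_neg (by omega)]
      by_cases h2 : zi + 1 ≤ (k : Int)
      · rw [if_pos ⟨h2, by omega, hkL⟩, abs_of_nonneg (by omega)]
        congr 1; omega
      · rw [if_neg (by omega), if_pos hkL, show (k : Int) - zi = 0 from by omega]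
        simp
  · rw [if_neg (by omega), if_neg (by omega), if_neg hkL]
    symm
    rw [List.getElem?_eq_none_iff]
    simp only [List.length_map, PySem.List.length_pyRange_one]
    omega
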